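-- pv_equiv track=rewrite | github.com/Jiinn-hhhh/whiplash | scripts/execution_config.py | _find_section
-- ===== SOURCE A (Python) =====
-- def _find_section(lines: list[str], headings: tuple[str, ...]) -> tuple[int, int] | None:
--     start = None
--     for idx, line in enumerate(lines):
--         stripped = line.strip()
--         if stripped.startswith("## "):
--             title = stripped[3:]
--             if title in headings:
--                 start = idx
--                 continue
--             if start is not None:
--                 return start, idx
--     if start is not None:
--         return start, len(lines)
--     return None
-- ===== SOURCE B (Python) =====
-- def _find_section(lines: list[str], headings: tuple[str, ...]) -> tuple[int, int] | None:
--     # B: classify heading lines into matching/non-matching index lists, then compute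
--     # the span by order arithmetic (min/first-after/max) instead of a stateful scan.
--     matches = []
--     others = []
--     for idx, line in enumerate(lines):
--         stripped = line.strip()
--         if stripped.startswith("## "):
--             (matches if stripped[3:] in headings else others).append(idx)
--     if not matches:
--         return None
--     first = matches[0]
--     end = next((n for n in others if n > first), len(lines))
--     start = max(m for m in matches if m < end)
--     return start, end
-- ===== Notes on version B (the rewrite author's own statement) =====
-- stated objective: alternative
-- what changed: B replaces A's stateful scan (a start accumulator reset on every match, returning at the first later non-match) by a classification of heading lines into two index lists plus order arithmetic: the section end is the first non-matching heading index after the first match (else len(lines)), and the start is the max matching index before that end.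
import Mathlib
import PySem

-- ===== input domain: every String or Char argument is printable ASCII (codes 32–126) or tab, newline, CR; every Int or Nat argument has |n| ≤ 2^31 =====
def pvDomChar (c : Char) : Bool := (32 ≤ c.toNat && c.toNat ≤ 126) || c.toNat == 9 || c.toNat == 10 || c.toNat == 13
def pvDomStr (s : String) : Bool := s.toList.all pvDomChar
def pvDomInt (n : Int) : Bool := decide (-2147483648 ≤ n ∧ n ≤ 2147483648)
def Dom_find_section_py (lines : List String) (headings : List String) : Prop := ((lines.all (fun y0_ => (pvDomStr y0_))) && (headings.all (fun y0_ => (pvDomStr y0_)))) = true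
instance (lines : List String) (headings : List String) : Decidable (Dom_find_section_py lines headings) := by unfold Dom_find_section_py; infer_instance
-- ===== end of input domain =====

-- B replaces A's stateful scan by classifying heading indices into two lists and resolving
-- the span by order arithmetic (first-after / max-before); same cost, different algorithm.

-- ===== PORT A =====
-- Literal port of A: one interleaved scan over enumerate(lines) tracking `start`.
def findA_loop (headings : List String) (n : Int) :
    List (Int × String) → Option Int → Option (Int × Int)
  | [], start =>
    match start with
    | some s => some (s, n)
    | none => none
  | (idx, line) :: rest, start =>
    let stripped := PySem.Str.strip line
    if PySem.Str.startswith stripped "## " then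
      let title := PySem.Str.slice stripped (some 3) none
      if title ∈ headings then
        findA_loop headings n rest (some idx)
      else
        match start with
        | some s => some (s, idx)
        | none => findA_loop headings n rest start
    else
      findA_loop headings n rest start

def find_section_py (lines : List String) (headings : List String) : Option (Int × Int) :=
  findA_loop headings (lines.length : Int) (PySem.List.enumerate lines 0) none

-- ===== PORT B =====
-- B helper: the classification loop — indices of '## ' lines whose title is/is not in headings.
def classifyB (headings : List String) : List (Int × String) → List Int × List Int
  | [] => ([], [])
  | (idx, line) :: rest =>
    let p := classifyB headings rest
    let stripped := PySem.Str.strip line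
    if PySem.Str.startswith stripped "## " then
      if PySem.Str.slice stripped (some 3) none ∈ headings then (idx :: p.1, p.2)
      else (p.1, idx :: p.2)
    else p

-- B helper: start = max(m for m in matches if m < end) and the (start, end) pair
-- (the `none` arm of max? is a totality guard: Python's max is only reached on a nonempty list).
def resolveB2 (ms : List Int) (e : Int) : Option (Int × Int) :=
  match PySem.List.max? (ms.filter (fun m => decide (m < e))) (fun x => x) with
  | some s => some (s, e)
  | none => none

-- B helper: end = next((n for n in others if n > first), len(lines)) → find?/getD, then resolveB2.
def resolveB (n : Int) (ms os : List Int) : Option (Int × Int) :=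
  match ms with
  | [] => none
  | first :: _ => resolveB2 ms ((os.find? (fun x => decide (first < x))).getD n)

def find_section_py_alt (lines : List String) (headings : List String) : Option (Int × Int) :=
  let p := classifyB headings (PySem.List.enumerate lines 0)
  resolveB (lines.length : Int) p.1 p.2

-- ===== PRECONDITION & SPEC =====
def Spec_find_section_py (lines : List String) (headings : List String) (out : Option (Int × Int)) : Prop := out = find_section_py_alt lines headings
instance (lines : List String) (headings : List String) (out : Option (Int × Int)) : Decidable (Spec_find_section_py lines headings out) := by unfold Spec_find_section_py; infer_instance

-- ===== CLAIM (what is proved, stated in full; the proofs are below) =====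
def Claim_equal_find_section_py : Prop := ∀ (lines : List String) (headings : List String), Dom_find_section_py lines headings → Spec_find_section_py lines headings (find_section_py lines headings)

-- ===== LEMMAS AND PROOFS =====

-- The '## ' lines of l, as (index, title) pairs.
def headsOf (l : List (Int × String)) : List (Int × String) :=
  ((l.filter (fun p => PySem.Str.startswith (PySem.Str.strip p.2) "## ")).map
    (fun p => (p.1, PySem.Str.slice (PySem.Str.strip p.2) (some 3) none)))

def msOf (headings : List String) (hs : List (Int × String)) : List Int :=
  (hs.filter (fun h => decide (h.2 ∈ headings))).map (·.1)

def osOf (headings : List String) (hs : List (Int × String)) : List Int :=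
  (hs.filter (fun h => !decide (h.2 ∈ headings))).map (·.1)

-- A's loop restricted to the heading pairs (intermediate between the two ports).
def hLoop (headings : List String) (n : Int) :
    List (Int × String) → Option Int → Option (Int × Int)
  | [], start =>
    match start with
    | some s => some (s, n)
    | none => none
  | (idx, title) :: rest, start =>
    if title ∈ headings then
      hLoop headings n rest (some idx)
    else
      match start with
      | some s => some (s, idx)
      | none => hLoop headings n rest start

theorem findA_eq_hLoop (headings : List String) (n : Int)
    (l : List (Int × String)) :
    ∀ start, findA_loop headings n l start = hLoop headings n (headsOf l) start := by
  induction l with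
  | nil => intro start; rfl
  | cons p rest ih =>
    intro start
    obtain ⟨idx, line⟩ := p
    by_cases hsw : PySem.Str.startswith (PySem.Str.strip line) "## " = true
    · by_cases ht : PySem.Str.slice (PySem.Str.strip line) (some 3) none ∈ headings
      · simp only [findA_loop, headsOf, List.filter_cons, hsw, if_true, List.map_cons,
          hLoop, ht, ih]
      · cases start with
        | some s =>
          simp only [findA_loop, headsOf, List.filter_cons, hsw, if_true, List.map_cons,
            hLoop, ht, if_false]
        | none =>
          simp only [findA_loop, headsOf, List.filter_cons, hsw, if_true, List.map_cons,
            hLoop, ht, if_false, ih]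
    · simp only [findA_loop, headsOf, List.filter_cons, hsw, Bool.false_eq_true, if_false, ih]

theorem msOf_cons_pos {headings : List String} {t : String} {i : Int}
    (hs : List (Int × String)) (ht : t ∈ headings) :
    msOf headings ((i, t) :: hs) = i :: msOf headings hs := by simp [msOf, ht]

theorem msOf_cons_neg {headings : List String} {t : String} {i : Int}
    (hs : List (Int × String)) (ht : t ∉ headings) :
    msOf headings ((i, t) :: hs) = msOf headings hs := by simp [msOf, ht]

theorem osOf_cons_pos {headings : List String} {t : String} {i : Int}
    (hs : List (Int × String)) (ht : t ∈ headings) :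
    osOf headings ((i, t) :: hs) = osOf headings hs := by simp [osOf, ht]

theorem osOf_cons_neg {headings : List String} {t : String} {i : Int}
    (hs : List (Int × String)) (ht : t ∉ headings) :
    osOf headings ((i, t) :: hs) = i :: osOf headings hs := by simp [osOf, ht]

theorem classifyB_eq (headings : List String) (l : List (Int × String)) :
    classifyB headings l = (msOf headings (headsOf l), osOf headings (headsOf l)) := by
  induction l with
  | nil => rfl
  | cons p rest ih =>
    obtain ⟨idx, line⟩ := p
    simp only [classifyB, headsOf, List.filter_cons, ih]
    by_cases hsw : PySem.Str.startswith (PySem.Str.strip line) "## " = true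
    · simp only [hsw, if_true, List.map_cons]
      by_cases ht : PySem.Str.slice (PySem.Str.strip line) (some 3) none ∈ headings
      · rw [msOf_cons_pos _ ht, osOf_cons_pos _ ht]
        simp only [ht, if_true]
      · rw [msOf_cons_neg _ ht, osOf_cons_neg _ ht]
        simp only [ht, if_false]
    · simp only [hsw, Bool.false_eq_true, if_false]

theorem mem_msOf {headings : List String} {rest : List (Int × String)} {x : Int}
    (hx : x ∈ msOf headings rest) : ∃ q ∈ rest, x = q.1 := by
  simp only [msOf, List.mem_map, List.mem_filter] at hx
  obtain ⟨q, ⟨hq, _⟩, hxq⟩ := hx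
  exact ⟨q, hq, hxq.symm⟩

theorem mem_osOf {headings : List String} {rest : List (Int × String)} {x : Int}
    (hx : x ∈ osOf headings rest) : ∃ q ∈ rest, x = q.1 := by
  simp only [osOf, List.mem_map, List.mem_filter] at hx
  obtain ⟨q, ⟨hq, _⟩, hxq⟩ := hx
  exact ⟨q, hq, hxq.symm⟩

theorem resolveB2_eval {i e : Int} (ms : List Int) (hie : i < e)
    (hms : ∀ x ∈ ms, e ≤ x) : resolveB2 (i :: ms) e = some (i, e) := by
  have h1 : ms.filter (fun m => decide (m < e)) = [] := by
    rw [List.filter_eq_nil_iff]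
    intro x hx
    simp only [decide_eq_true_eq, not_lt]
    exact hms x hx
  simp [resolveB2, hie, h1, PySem.List.max?_id_cons]

theorem resolveB2_absorb {i j e : Int} (ms : List Int) (hij : i < j)
    (hie : i < e) (hje : j < e) :
    resolveB2 (i :: j :: ms) e = resolveB2 (j :: ms) e := by
  simp [resolveB2, hie, hje, PySem.List.max?_id_cons,
    max_eq_right (le_of_lt hij)]

-- started case: once `start = some i` with i below all remaining indices.
theorem hLoop_some_eq (headings : List String) (n : Int) :
    ∀ (rest : List (Int × String)) (i : Int),
      rest.Pairwise (fun p q => p.1 < q.1) →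
      (∀ q ∈ rest, i < q.1) → (∀ q ∈ rest, q.1 < n) → i < n →
      hLoop headings n rest (some i) =
        resolveB n (i :: msOf headings rest) (osOf headings rest) := by
  intro rest
  induction rest with
  | nil =>
    intro i _ _ _ hin
    have : hLoop headings n [] (some i) = some (i, n) := rfl
    rw [this]
    simp only [msOf, osOf, List.filter_nil, List.map_nil, resolveB, List.find?_nil,
      Option.getD_none]
    exact (resolveB2_eval [] hin (by intro x hx; simp at hx)).symm
  | cons q rest' ih =>
    intro i hpw hlt hbn hin
    obtain ⟨j, u⟩ := q
    have hij : i < j := hlt (j, u) (by simp)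
    have hjlt : ∀ r ∈ rest', j < r.1 := (List.pairwise_cons.mp hpw).1
    have hpw' : rest'.Pairwise (fun p q => p.1 < q.1) := (List.pairwise_cons.mp hpw).2
    have hbn' : ∀ r ∈ rest', r.1 < n := fun r hr => hbn r (by simp [hr])
    have hjn : j < n := hbn (j, u) (by simp)
    by_cases hu : u ∈ headings
    · -- match: start moves to j; the extra i is absorbed by max (i < j).
      have lhs : hLoop headings n ((j, u) :: rest') (some i) =
          hLoop headings n rest' (some j) := by simp [hLoop, hu]
      rw [lhs, ih j hpw' (fun r hr => hjlt r hr) hbn' hjn,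
        msOf_cons_pos _ hu, osOf_cons_pos _ hu]
      simp only [resolveB]
      cases hos : osOf headings rest' with
      | nil =>
        simp only [List.find?_nil, Option.getD_none]
        exact (resolveB2_absorb _ hij hin hjn).symm
      | cons x os'' =>
        have hxmem : x ∈ osOf headings rest' := by rw [hos]; simp
        obtain ⟨r, hr, hxr⟩ := mem_osOf hxmem
        have hjx : j < x := by rw [hxr]; exact hjlt r hr
        have hix : i < x := lt_trans hij hjx
        rw [List.find?_cons_of_pos (by simpa using hjx),
          List.find?_cons_of_pos (by simpa using hix), Option.getD_some]
        exact (resolveB2_absorb _ hij hix hjx).symm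
    · -- non-match: A returns (i, j); B: end = j, only i survives the filter.
      have lhs : hLoop headings n ((j, u) :: rest') (some i) = some (i, j) := by
        simp [hLoop, hu]
      rw [lhs, msOf_cons_neg _ hu, osOf_cons_neg _ hu]
      simp only [resolveB]
      rw [List.find?_cons_of_pos (by simpa using hij), Option.getD_some]
      refine (resolveB2_eval _ hij ?_).symm
      intro x hx
      obtain ⟨r, hr, hxr⟩ := mem_msOf hx
      rw [hxr]; exact le_of_lt (hjlt r hr)

theorem hLoop_none_eq (headings : List String) (n : Int) :
    ∀ (heads : List (Int × String)),
      heads.Pairwise (fun p q => p.1 < q.1) →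
      (∀ q ∈ heads, q.1 < n) →
      hLoop headings n heads none =
        resolveB n (msOf headings heads) (osOf headings heads) := by
  intro heads
  induction heads with
  | nil => intro _ _; rfl
  | cons q rest ih =>
    intro hpw hbn
    obtain ⟨i, t⟩ := q
    have hlt : ∀ r ∈ rest, i < r.1 := (List.pairwise_cons.mp hpw).1
    have hpw' := (List.pairwise_cons.mp hpw).2
    have hbn' : ∀ r ∈ rest, r.1 < n := fun r hr => hbn r (by simp [hr])
    have hin : i < n := hbn (i, t) (by simp)
    by_cases ht : t ∈ headings
    · have lhs : hLoop headings n ((i, t) :: rest) none =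
          hLoop headings n rest (some i) := by simp [hLoop, ht]
      rw [lhs, hLoop_some_eq headings n rest i hpw' hlt hbn' hin,
        msOf_cons_pos _ ht, osOf_cons_pos _ ht]
    · have lhs : hLoop headings n ((i, t) :: rest) none =
          hLoop headings n rest none := by simp [hLoop, ht]
      rw [lhs, ih hpw' hbn', msOf_cons_neg _ ht, osOf_cons_neg _ ht]
      cases hms : msOf headings rest with
      | nil => rfl
      | cons f ms' =>
        have hf : f ∈ msOf headings rest := by rw [hms]; simp
        obtain ⟨r, hr, hfr⟩ := mem_msOf hf
        have hif : i < f := by rw [hfr]; exact hlt r hr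
        simp only [resolveB]
        rw [List.find?_cons_of_neg (by simp; omega)]

theorem headsOf_pairwise {l : List (Int × String)}
    (h : l.Pairwise (fun p q => p.1 < q.1)) :
    (headsOf l).Pairwise (fun p q => p.1 < q.1) := by
  unfold headsOf
  rw [List.pairwise_map]
  exact (h.filter _)

-- ===== VERDICT (by name: the statement is the Claim_ definition above) =====
theorem find_section_py_spec : Claim_equal_find_section_py := by
  intro lines headings _
  unfold Spec_find_section_py find_section_py find_section_py_alt
  rw [classifyB_eq]
  have hpw : (headsOf (PySem.List.enumerate lines 0)).Pairwise (fun p q => p.1 < q.1) :=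
    headsOf_pairwise (PySem.List.pairwise_lt_enumerate lines 0)
  have hbn : ∀ q ∈ headsOf (PySem.List.enumerate lines 0), q.1 < (lines.length : Int) := by
    intro q hq
    unfold headsOf at hq
    simp only [List.mem_map, List.mem_filter] at hq
    obtain ⟨p, ⟨hp, _⟩, hpq⟩ := hq
    rw [PySem.List.mem_enumerate_iff] at hp
    obtain ⟨k, hk, hpk⟩ := hp
    subst hpq hpk
    simp; omega
  rw [findA_eq_hLoop, hLoop_none_eq headings _ _ hpw hbn]
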